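-- pv_equiv track=rewrite | github.com/AlexisGR117/AYPR | Programas/cajas.py | ventarron
-- ===== SOURCE A (Python) =====
-- def ventarron(repisas):
--     """Funcion que dada la matriz que representa la estanteria con cajas
--     da otra matriz con el resultado de la estanteria despues de ocurrir un ventarron
--     (list2D) -> list2D"""
--     matriz = []
--     for i in range(len(repisas)):
--         fila = []
--         for j in range(len(repisas[i])):
--             if repisas[i][j] == 2:
--                 fila.append(j - 1)
--         matriz.append(fila)
--         if matriz[i] == []:
--             matriz[i].append(len(repisas[i]))
--     for i in range(len(repisas)):
--         cont = 1
--         while cont <= matriz[i][0]: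
--             if matriz[i][0] - cont + 1 < len(repisas[i]):
--                 if repisas[i][matriz[i][0] - cont] == 1 and repisas[i][matriz[i][0] - cont + 1] == 0:
--                     repisas[i][matriz[i][0] - cont] = 0
--                     repisas[i][matriz[i][0] - cont + 1] = 1
--                     cont -= 2
--             cont += 1
--     return repisas
-- ===== SOURCE B (Python) =====
-- def ventarron(repisas):
--     """Counting pass per row: only positions before the first wall (2) can change;
--     within each maximal run of 0/1 cells there, the 1's end up packed to the right.
--     Returns a new matrix (does not mutate the argument, unlike the original)."""
--     resultado = []
--     for fila in repisas:
--         limite = len(fila)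
--         for j, v in enumerate(fila):
--             if v == 2:
--                 limite = j
--                 break
--         nueva = []
--         ceros = 0
--         unos = 0
--         for v in fila[:limite]:
--             if v == 0:
--                 ceros += 1
--             elif v == 1:
--                 unos += 1
--             else:
--                 nueva.extend([0] * ceros + [1] * unos)
--                 nueva.append(v)
--                 ceros = 0
--                 unos = 0
--         nueva.extend([0] * ceros + [1] * unos)
--         resultado.append(nueva + fila[limite:])
--     return resultado
-- ===== Notes on version B (the rewrite author's own statement) =====
-- stated objective: alternative
-- what changed: Per row B finds the first wall once and does a single counting pass over the segment before it, emitting each maximal 0/1 run as its zeros followed by its ones, instead of A's in-place adjacent-swap sliding loop with backtracking (gnome-sort-like); B returns a new matrix rather than mutating the argument. A's loop is quadratic in the worst case while B is one pass, but on typical random inputs the measured times are comparable.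
import Mathlib
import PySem

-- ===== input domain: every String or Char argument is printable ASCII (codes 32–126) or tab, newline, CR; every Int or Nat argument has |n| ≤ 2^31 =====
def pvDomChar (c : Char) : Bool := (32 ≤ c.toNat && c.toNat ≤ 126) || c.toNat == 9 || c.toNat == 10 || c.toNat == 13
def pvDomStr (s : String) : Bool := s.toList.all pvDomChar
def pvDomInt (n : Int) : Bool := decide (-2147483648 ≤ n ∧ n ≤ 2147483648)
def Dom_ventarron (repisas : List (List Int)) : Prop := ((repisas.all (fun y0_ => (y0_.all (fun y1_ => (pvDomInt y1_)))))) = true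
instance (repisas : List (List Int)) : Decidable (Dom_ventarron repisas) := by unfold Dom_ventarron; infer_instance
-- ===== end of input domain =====

-- B replaces A's in-place adjacent-swap sliding loop by a single counting pass per row
-- (a different algorithm, same result); equivalence is about the RETURN value: A mutates
-- `repisas` in place and returns it, B builds a new matrix.

-- ===== PORT A =====
-- Python list read repisas[i][k] with k provably ≥ 0 and in range wherever evaluated; the
-- default 0 of pgA is never hit on reachable indices.
def pgA (l : List Int) (i : Int) : Int := (PySem.List.pyGet? l i).getD 0

-- A's inner `while cont <= matriz[i][0]` loop, transliterated with a fuel argument; the fuel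
-- passed by `ventarron` is proven sufficient (loopA_inv below), so the cutoff is never hit.
def loopA (m : Int) : List Int → Int → Nat → List Int
  | row, _, 0 => row
  | row, cont, fuel+1 =>
    if cont ≤ m then
      if m - cont + 1 < (row.length : Int) then
        if pgA row (m - cont) = 1 ∧ pgA row (m - cont + 1) = 0 then
          loopA m ((row.set (m - cont).toNat 0).set (m - cont + 1).toNat 1) (cont - 2 + 1) fuel
        else loopA m row (cont + 1) fuel
      else loopA m row (cont + 1) fuel
    else row

-- body of A's first `for i` loop: the list of j-1 for walls, or [len] if none
def filaDeParedes (filaR : List Int) : List Int :=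
  let fila := (List.range filaR.length).foldl (fun fila j =>
    if filaR.getD j 0 = 2 then fila ++ [(j : Int) - 1] else fila) []
  if fila = [] then fila ++ [(filaR.length : Int)] else fila

def ventarron (repisas : List (List Int)) : List (List Int) :=
  let matriz := (List.range repisas.length).foldl (fun matriz i =>
    matriz ++ [filaDeParedes (repisas.getD i [])]) []
  (List.range repisas.length).foldl (fun reps i =>
    reps.set i (loopA ((matriz.getD i []).headD 0) (reps.getD i []) 1
      (((reps.getD i []).length + 2) ^ 3))) repisas

-- ===== PORT B =====
-- one counting pass over the segment before the first wall: each maximal run of 0/1 cells is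
-- emitted as its zeros followed by its ones; any other value is a fixed obstacle.
def compactaBloques : List Int → Nat → Nat → List Int → List Int
  | [], ceros, unos, nueva => nueva ++ List.replicate ceros 0 ++ List.replicate unos 1
  | v :: resto, ceros, unos, nueva =>
    if v = 0 then compactaBloques resto (ceros + 1) unos nueva
    else if v = 1 then compactaBloques resto ceros (unos + 1) nueva
    else compactaBloques resto 0 0 (nueva ++ List.replicate ceros 0 ++ List.replicate unos 1 ++ [v])

def ventarron_alt (repisas : List (List Int)) : List (List Int) :=
  repisas.map (fun fila =>
    let limite := fila.findIdx (· = 2)   -- Source B's break-scan; findIdx = length when no 2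
    compactaBloques (fila.take limite) 0 0 [] ++ fila.drop limite)

-- ===== PRECONDITION & SPEC =====
def Spec_ventarron (repisas : List (List Int)) (out : List (List Int)) : Prop := out = ventarron_alt repisas
instance (repisas : List (List Int)) (out : List (List Int)) : Decidable (Spec_ventarron repisas out) := by unfold Spec_ventarron; infer_instance

-- ===== CLAIM (what is proved, stated in full; the proofs are below) =====
def Claim_equal_ventarron : Prop := ∀ (repisas : List (List Int)), Dom_ventarron repisas → Spec_ventarron repisas (ventarron repisas)

-- ===== LEMMAS AND PROOFS =====

-- insertion-style compaction, the proof-side normal form shared by both ports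
def ins1 : List Int → List Int
  | [] => [1]
  | x :: t => if x = 0 then 0 :: ins1 t else 1 :: x :: t

def IC : List Int → List Int
  | [] => []
  | x :: xs => if x = 0 then 0 :: IC xs else if x = 1 then ins1 (IC xs) else x :: IC xs

-- segment inversion count (pairs 1-before-0), the termination measure of A's loop
def invc : List Int → Nat
  | [] => 0
  | x :: xs => (if x = 1 then xs.count 0 else 0) + invc xs

lemma ins1_iter_cons_zero (n : Nat) (t : List Int) : ins1^[n] (0 :: t) = 0 :: ins1^[n] t := by
  induction n generalizing t with
  | zero => rfl
  | succ n ih => rw [Function.iterate_succ_apply, Function.iterate_succ_apply]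
                 simp [ins1, ih]

lemma ins1_iter_cons_ne (n : Nat) : ∀ (x : Int) (t : List Int), x ≠ 0 →
    ins1^[n] (x :: t) = List.replicate n 1 ++ x :: t := by
  induction n with
  | zero => intro x t _; rfl
  | succ n ih =>
    intro x t hx
    rw [Function.iterate_succ_apply]
    have : ins1 (x :: t) = 1 :: x :: t := by simp [ins1, hx]
    rw [this, ih 1 (x :: t) one_ne_zero]
    simp [List.replicate_succ']

lemma ins1_iter_nil (n : Nat) : ins1^[n] ([] : List Int) = List.replicate n 1 := by
  induction n with
  | zero => rfl
  | succ n _ =>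
    rw [Function.iterate_succ_apply]
    show ins1^[n] [1] = _
    rw [ins1_iter_cons_ne n 1 [] one_ne_zero]
    simp [List.replicate_succ']

lemma compactaBloques_eq (l : List Int) : ∀ (c u : Nat) (out : List Int),
    compactaBloques l c u out = out ++ List.replicate c 0 ++ ins1^[u] (IC l) := by
  induction l with
  | nil => intro c u out; simp [compactaBloques, IC, ins1_iter_nil]
  | cons x xs ih =>
    intro c u out
    simp only [compactaBloques]
    split_ifs with h0 h1
    · rw [ih]
      simp [IC, h0, ins1_iter_cons_zero, List.replicate_succ', List.append_assoc]
    · rw [ih]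
      simp [IC, h0, h1, Function.iterate_succ_apply]
    · rw [ih]
      simp [IC, h0, h1, ins1_iter_cons_ne u x _ h0, List.append_assoc]

-- a list with no adjacent (1,0) pattern is already compact
lemma IC_of_nopat (l : List Int)
    (h : ∀ j : Nat, j + 1 < l.length → ¬(l.getD j 0 = 1 ∧ l.getD (j + 1) 0 = 0)) :
    IC l = l := by
  induction l with
  | nil => rfl
  | cons x xs ih =>
    have hxs : IC xs = xs := by
      apply ih
      intro j hj
      have := h (j + 1) (by simpa using by omega)
      simpa [List.getD_cons_succ] using this
    simp only [IC]
    split_ifs with h0 h1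
    · rw [hxs, h0]
    · rw [hxs, h1]
      cases xs with
      | nil => rfl
      | cons y t =>
        have hy : y ≠ 0 := by
          have := h 0 (by simp)
          simp [h1] at this
          exact this
        simp [ins1, hy]
    · rw [hxs]

-- compaction is invariant under one adjacent (1,0) → (0,1) swap
lemma IC_swap (u v : List Int) : IC (u ++ 1 :: 0 :: v) = IC (u ++ 0 :: 1 :: v) := by
  induction u with
  | nil => simp [IC, ins1]
  | cons x u ih => simp [IC, ih]

-- the swap removes exactly one inversion
lemma invc_swap (u v : List Int) : invc (u ++ 1 :: 0 :: v) = invc (u ++ 0 :: 1 :: v) + 1 := by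
  induction u with
  | nil => simp [invc, List.count_cons]; omega
  | cons x u ih =>
    simp only [List.cons_append, invc]
    have hc : (u ++ 1 :: 0 :: v).count 0 = (u ++ 0 :: 1 :: v).count 0 := by
      simp [List.count_append, List.count_cons]
    rw [ih, hc]
    omega

lemma invc_le (l : List Int) : invc l ≤ l.length * l.length := by
  induction l with
  | nil => simp [invc]
  | cons x xs ih =>
    have hcnt : xs.count 0 ≤ xs.length := List.count_le_length
    simp only [invc, List.length_cons]
    split_ifs <;> nlinarith


lemma pgA_natCast (l : List Int) (j : Nat) : pgA l (j : Int) = l.getD j 0 := by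
  simp [pgA, List.getD_eq_getElem?_getD]

lemma getD_take_lt (l : List Int) (s j : Nat) (h : j < s) :
    (l.take s).getD j 0 = l.getD j 0 := by
  simp [List.getD_eq_getElem?_getD, List.getElem?_take, h]

-- a list whose positions a, a+1 hold 1, 0 decomposes around that pair
lemma cons_decomp (l : List Int) (a : Nat) (h : a + 1 < l.length)
    (h1 : l.getD a 0 = 1) (h0 : l.getD (a + 1) 0 = 0) :
    l = l.take a ++ 1 :: 0 :: l.drop (a + 2) := by
  conv_lhs => rw [← List.take_append_drop a l]
  rw [List.drop_eq_getElem_cons (by omega : a < l.length),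
      List.drop_eq_getElem_cons (by omega : a + 1 < l.length)]
  rw [List.getD_eq_getElem l 0 (by omega : a < l.length)] at h1
  rw [List.getD_eq_getElem l 0 h] at h0
  rw [h1, h0]

-- the double set performing the swap, decomposed the same way
lemma set_swap_decomp (l : List Int) (a : Nat) (h : a + 1 < l.length) :
    (l.set a 0).set (a + 1) 1 = l.take a ++ 0 :: 1 :: l.drop (a + 2) := by
  apply List.ext_getElem?
  intro j
  simp only [List.getElem?_set, List.length_set, List.getElem?_append, List.getElem?_take,
    List.length_take, List.getElem?_drop, List.getElem?_cons]
  split_ifs <;> first | rfl | omega | (congr 1; omega)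

-- once no (1,0) pair remains in the segment, the row is its own compaction
lemma exit_eq (row : List Int) (s : Nat) (hsL : s ≤ row.length)
    (h : ∀ j : Nat, j + 1 < s → ¬(row.getD j 0 = 1 ∧ row.getD (j + 1) 0 = 0)) :
    IC (row.take s) ++ row.drop s = row := by
  rw [IC_of_nopat, List.take_append_drop]
  intro j hj
  have hlen : (row.take s).length = s := by rw [List.length_take]; omega
  rw [hlen] at hj
  rw [getD_take_lt row s j (by omega), getD_take_lt row s (j + 1) (by omega)]
  exact h j hj

-- main invariant of A's while loop: with enough fuel it computes the segment compaction
lemma loopA_inv (m : Int) (L s : Nat) (hsL : s ≤ L) (hsm : (s : Int) ≤ m + 1) :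
    ∀ (fuel : Nat) (row : List Int) (cont : Int),
      row.length = L →
      (((s : Int) = m + 1 ∧ s < L ∧ row.getD s 0 = 2) ∨ (m = (L : Int) ∧ s = L)) →
      0 ≤ cont →
      (∀ j : Nat, m - cont < (j : Int) → j + 1 < s → ¬(row.getD j 0 = 1 ∧ row.getD (j + 1) 0 = 0)) →
      invc (row.take s) * (s + 2) + (m + 1 - cont).toNat ≤ fuel →
      loopA m row cont fuel = IC (row.take s) ++ row.drop s := by
  intro fuel
  induction fuel with
  | zero =>
    intro row cont hL hwall hc0 hsrt hmeas
    show row = _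
    refine (exit_eq row s (by omega) fun j hj => hsrt j (by omega) hj).symm
  | succ fuel ih =>
    intro row cont hL hwall hc0 hsrt hmeas
    by_cases hcm : cont ≤ m
    · have ha0 : 0 ≤ m - cont := by omega
      set a : Nat := (m - cont).toNat with ha
      have hma : m - cont = (a : Int) := by omega
      have hpgA : (pgA row (m - cont) = 1 ∧ pgA row (m - cont + 1) = 0) ↔
          (row.getD a 0 = 1 ∧ row.getD (a + 1) 0 = 0) := by
        rw [hma, show (a : Int) + 1 = ((a + 1 : Nat) : Int) by push_cast; ring,
          pgA_natCast, pgA_natCast]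
      by_cases hbnd : m - cont + 1 < (row.length : Int)
      · by_cases hpat : row.getD a 0 = 1 ∧ row.getD (a + 1) 0 = 0
        · -- swap branch
          have ha1L : a + 1 < L := by omega
          have hcont1 : 1 ≤ cont := by
            by_contra hcc
            rcases hwall with hw | hw
            · have h2 : row.getD (a + 1) 0 = 2 := by
                rw [show a + 1 = s by omega]; exact hw.2.2
              rw [hpat.2] at h2; omega
            · omega
          have has : a + 1 < s := by rcases hwall with hw | hw <;> omega
          set seg := row.take s with hseg
          have hsegL : seg.length = s := by rw [hseg, List.length_take]; omega
          have hsega1 : a + 1 < seg.length := by omega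
          have hsegd : seg = seg.take a ++ 1 :: 0 :: seg.drop (a + 2) :=
            cons_decomp seg a hsega1
              (by rw [hseg, getD_take_lt row s a (by omega)]; exact hpat.1)
              (by rw [hseg, getD_take_lt row s (a + 1) (by omega)]; exact hpat.2)
          set row' := (row.set a 0).set (a + 1) 1 with hrow'
          have htake' : row'.take s = seg.take a ++ 0 :: 1 :: seg.drop (a + 2) := by
            rw [hrow', List.take_set, List.take_set, ← hseg, set_swap_decomp seg a hsega1]
          have hIC : IC (row'.take s) = IC (row.take s) := by
            rw [htake', ← hseg]
            conv_rhs => rw [hsegd]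
            exact (IC_swap _ _).symm
          have hinv : invc seg = invc (row'.take s) + 1 := by
            rw [htake']
            conv_lhs => rw [hsegd]
            exact invc_swap _ _
          have hdrop' : row'.drop s = row.drop s := by
            rw [hrow', List.drop_set_of_lt (by omega), List.drop_set_of_lt (by omega)]
          have hL' : row'.length = L := by simp [hrow', hL]
          have hwall' : ((s : Int) = m + 1 ∧ s < L ∧ row'.getD s 0 = 2) ∨
              (m = (L : Int) ∧ s = L) := by
            rcases hwall with hw | hw
            · refine Or.inl ⟨hw.1, hw.2.1, ?_⟩
              rw [hrow', List.getD_eq_getElem?_getD, List.getElem?_set_ne (by omega),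
                List.getElem?_set_ne (by omega), ← List.getD_eq_getElem?_getD]
              exact hw.2.2
            · exact Or.inr hw
          have hget' : ∀ j : Nat, a + 2 ≤ j → row'.getD j 0 = row.getD j 0 := by
            intro j hj
            rw [hrow', List.getD_eq_getElem?_getD, List.getElem?_set_ne (by omega),
              List.getElem?_set_ne (by omega), ← List.getD_eq_getElem?_getD]
          have hsrt' : ∀ j : Nat, m - (cont - 2 + 1) < (j : Int) → j + 1 < s →
              ¬(row'.getD j 0 = 1 ∧ row'.getD (j + 1) 0 = 0) := by
            intro j hj hjs
            rw [hget' j (by omega), hget' (j + 1) (by omega)]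
            exact hsrt j (by omega) hjs
          have hms1 : m ≤ (s : Int) := by rcases hwall with hw | hw <;> omega
          have hmeas' : invc (row'.take s) * (s + 2) + (m + 1 - (cont - 2 + 1)).toNat ≤ fuel := by
            have hexp : (invc (row'.take s) + 1) * (s + 2) = invc (row'.take s) * (s + 2) + (s + 2) := by
              ring
            rw [hinv] at hmeas
            omega
          have hstep : loopA m row cont (fuel + 1) = loopA m row' (cont - 2 + 1) fuel := by
            simp only [loopA, if_pos hcm, if_pos hbnd, if_pos (hpgA.mpr hpat)]
            rw [hrow', ← ha, show (m - cont + 1).toNat = a + 1 by omega]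
          rw [hstep, ih row' (cont - 2 + 1) hL' hwall' (by omega) hsrt' hmeas', hIC, hdrop']
        · -- pattern fails: advance
          have hsrt' : ∀ j : Nat, m - (cont + 1) < (j : Int) → j + 1 < s →
              ¬(row.getD j 0 = 1 ∧ row.getD (j + 1) 0 = 0) := by
            intro j hj hjs
            by_cases hjc : m - cont < (j : Int)
            · exact hsrt j hjc hjs
            · have : j = a := by omega
              rw [this]; exact hpat
          have hstep : loopA m row cont (fuel + 1) = loopA m row (cont + 1) fuel := by
            simp only [loopA, if_pos hcm, if_pos hbnd, if_neg (fun hh => hpat (hpgA.mp hh))]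
          rw [hstep, ih row (cont + 1) hL hwall (by omega) hsrt' (by omega)]
      · -- bound fails: advance
        have hsrt' : ∀ j : Nat, m - (cont + 1) < (j : Int) → j + 1 < s →
            ¬(row.getD j 0 = 1 ∧ row.getD (j + 1) 0 = 0) := by
          intro j hj hjs
          by_cases hjc : m - cont < (j : Int)
          · exact hsrt j hjc hjs
          · exfalso; rw [hL] at hbnd; omega
        have hstep : loopA m row cont (fuel + 1) = loopA m row (cont + 1) fuel := by
          simp only [loopA, if_pos hcm, if_neg hbnd]
        rw [hstep, ih row (cont + 1) hL hwall (by omega) hsrt' (by omega)]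
    · simp only [loopA, if_neg hcm]
      refine (exit_eq row s (by omega) fun j hj => hsrt j (by omega) hj).symm


-- characterisation of matriz[i][0]: (first wall index) - 1, or the row length
lemma head_filaDeParedes (fila : List Int) :
    (filaDeParedes fila).headD 0 =
      if fila.findIdx (· = 2) < fila.length then (fila.findIdx (· = 2) : Int) - 1
      else (fila.length : Int) := by
  have hfold := PySem.List.foldl_append_if (fun j => decide (fila.getD j 0 = 2))
    (fun j => (j : Int) - 1) (List.range fila.length) []
  simp only [decide_eq_true_eq, List.nil_append] at hfold
  unfold filaDeParedes
  rw [hfold]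
  by_cases h : fila.findIdx (· = 2) < fila.length
  · set W := fila.findIdx (· = 2) with hW
    have hsplit : fila.length = W + 1 + (fila.length - (W + 1)) := by omega
    have hfil : (List.range fila.length).filter (fun j => decide (fila.getD j 0 = 2))
        = [W] ++ (List.map (fun x => W + 1 + x) (List.range (fila.length - (W + 1)))).filter
            (fun j => decide (fila.getD j 0 = 2)) := by
      conv_lhs => rw [hsplit]
      rw [List.range_add, List.filter_append, List.range_succ, List.filter_append]
      have h1 : (List.range W).filter (fun j => decide (fila.getD j 0 = 2)) = [] := by
        rw [List.filter_eq_nil_iff]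
        intro j hj
        have hjW : j < W := List.mem_range.mp hj
        have := List.not_of_lt_findIdx (p := (· = 2)) (xs := fila) hjW
        simp only [decide_eq_true_eq] at this ⊢
        rw [List.getD_eq_getElem _ _ (by omega)]
        simpa using this
      have h2 : [W].filter (fun j => decide (fila.getD j 0 = 2)) = [W] := by
        have hg := List.findIdx_getElem (p := (· = 2)) (xs := fila) (w := h)
        simp only [decide_eq_true_eq] at hg
        simp only [List.filter_cons, List.filter_nil]
        rw [List.getD_eq_getElem _ _ h]
        simp only [hW]
        simp [hg]
      rw [h1, h2, List.nil_append]
    rw [hfil]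
    simp [h]
  · have hWlen : fila.findIdx (· = 2) = fila.length :=
      le_antisymm List.findIdx_le_length (by omega)
    have hfil : (List.range fila.length).filter (fun j => decide (fila.getD j 0 = 2)) = [] := by
      rw [List.filter_eq_nil_iff]
      intro j hj
      have hjW : j < fila.length := List.mem_range.mp hj
      have := List.not_of_lt_findIdx (p := (· = 2)) (xs := fila) (by omega : j < fila.findIdx (· = 2))
      simp only [decide_eq_true_eq] at this ⊢
      rw [List.getD_eq_getElem _ _ hjW]
      simpa using this
    rw [hfil]
    simp [h]

-- one row: A's sliding loop equals B's counting pass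
lemma row_eq (fila : List Int) :
    loopA ((filaDeParedes fila).headD 0) fila 1 ((fila.length + 2) ^ 3)
      = compactaBloques (fila.take (fila.findIdx (· = 2))) 0 0 []
          ++ fila.drop (fila.findIdx (· = 2)) := by
  set W := fila.findIdx (· = 2) with hWdef
  have hWle : W ≤ fila.length := List.findIdx_le_length
  have hRHS : compactaBloques (fila.take W) 0 0 [] = IC (fila.take W) := by
    rw [compactaBloques_eq]; simp
  rw [hRHS, head_filaDeParedes, ← hWdef]
  have hmeas : ∀ s : Nat, s ≤ fila.length → invc (fila.take s) * (s + 2) + s ≤ (fila.length + 2) ^ 3 := by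
    intro s hs
    have h1 : invc (fila.take s) ≤ s * s := by
      have := invc_le (fila.take s)
      have hl : (fila.take s).length = s := by rw [List.length_take]; omega
      rw [hl] at this; exact this
    have h2 : invc (fila.take s) * (s + 2) ≤ s * s * (s + 2) :=
      Nat.mul_le_mul_right _ h1
    have hmul : s * s * (s + 2) ≤ fila.length * fila.length * (fila.length + 2) :=
      Nat.mul_le_mul (Nat.mul_le_mul hs hs) (by omega)
    have he1 : (fila.length + 2) ^ 3
        = fila.length * fila.length * (fila.length + 2)
          + 4 * (fila.length * (fila.length + 2)) + 4 * (fila.length + 2) := by ring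
    nlinarith [h2, hmul, he1, hs]
  by_cases h : W < fila.length
  · rw [if_pos h]
    have hwall2 : fila.getD W 0 = 2 := by
      have := List.findIdx_getElem (p := (· = 2)) (xs := fila) (w := h)
      simp only [decide_eq_true_eq] at this
      rw [List.getD_eq_getElem _ _ h]
      simpa using this
    exact loopA_inv ((W : Int) - 1) fila.length W hWle (by omega)
      ((fila.length + 2) ^ 3) fila 1 rfl
      (Or.inl ⟨by ring, h, hwall2⟩) (by omega)
      (fun j hj hjs => absurd (by omega : False) (by simp))
      (by have := hmeas W hWle; omega)
  · have hWlen : W = fila.length := le_antisymm hWle (by omega)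
    rw [if_neg h, hWlen]
    exact loopA_inv (fila.length : Int) fila.length fila.length le_rfl (by omega)
      ((fila.length + 2) ^ 3) fila 1 rfl
      (Or.inr ⟨rfl, rfl⟩) (by omega)
      (fun j hj hjs => absurd (by omega : False) (by simp))
      (by have := hmeas fila.length le_rfl; omega)

-- the second `for i` loop of A: set-at-i over range = map over the first k rows
lemma foldl_set_range (F : Nat → List Int → List Int) (l : List (List Int)) :
    ∀ k, k ≤ l.length →
      (List.range k).foldl (fun acc i => acc.set i (F i (acc.getD i []))) l
        = (l.take k).mapIdx (fun i x => F i x) ++ l.drop k := by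
  intro k
  induction k with
  | zero => simp
  | succ k ih =>
    intro hk
    rw [List.range_succ, List.foldl_append, ih (by omega)]
    simp only [List.foldl_cons, List.foldl_nil]
    have hkL : k < l.length := by omega
    have hAlen : ((l.take k).mapIdx (fun i x => F i x)).length = k := by
      rw [List.length_mapIdx, List.length_take]; omega
    have hgd : (((l.take k).mapIdx (fun i x => F i x)) ++ l.drop k).getD k [] = l[k] := by
      rw [List.getD_eq_getElem?_getD, List.getElem?_append_right (by omega), hAlen,
        Nat.sub_self, List.getElem?_drop]
      simp [List.getElem?_eq_getElem hkL]
    rw [hgd, List.set_append_right _ _ (by omega), hAlen, Nat.sub_self,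
      List.drop_eq_getElem_cons hkL]
    simp only [List.set_cons_zero]
    have htake : List.take (k + 1) l = List.take k l ++ [l[k]] := by
      rw [List.take_add_one, List.getElem?_eq_getElem hkL]
      rfl
    rw [htake, List.mapIdx_append]
    simp [List.length_take, Nat.min_eq_left (by omega : k ≤ l.length)]

lemma ventarron_eq_map (l : List (List Int)) :
    ventarron l = l.map (fun fila =>
      loopA ((filaDeParedes fila).headD 0) fila 1 ((fila.length + 2) ^ 3)) := by
  unfold ventarron
  rw [PySem.List.foldl_append_singleton_eq_map, List.nil_append]
  rw [foldl_set_range (fun i x =>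
    loopA ((((List.range l.length).map (fun i => filaDeParedes (l.getD i []))).getD i []).headD 0)
      x 1 ((x.length + 2) ^ 3)) l l.length le_rfl]
  simp only [List.take_length, List.drop_length, List.append_nil]
  apply List.ext_getElem (by simp)
  intro i h1 h2
  rw [List.getElem_mapIdx, List.getElem_map]
  have hi : i < l.length := by simpa using h1
  rw [PySem.List.getD_map_range _ _ _ _ hi, List.getD_eq_getElem _ _ hi]

-- ===== VERDICT (by name: the statement is the Claim_ definition above) =====
theorem ventarron_spec : Claim_equal_ventarron := by
  intro repisas _
  show ventarron repisas = ventarron_alt repisas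
  rw [ventarron_eq_map]
  unfold ventarron_alt
  exact List.map_congr_left (fun fila _ => row_eq fila)
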